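-- pv_equiv track=rewrite | github.com/johnscronin/vibes-savant | calculate_percentiles.py | calc_percentile
-- ===== SOURCE A (Python) =====
-- def calc_percentile(value, pool, higher_is_better):
--     """percentile = round((# with worse value / total) * 100). Clamped [1, 99]."""
--     if value is None:
--         return None
--     n = len(pool)
--     if n < 5:
--         return None  # pool too small
--
--     if higher_is_better:
--         worse = sum(1 for v in pool if v < value)
--     else:
--         worse = sum(1 for v in pool if v > value)
--
--     pct = round((worse / n) * 100)
--     return max(1, min(99, pct))
-- ===== SOURCE B (Python) =====
-- def _lower(s, ok):
--     # first index at which ok fails, for a prefix-closed predicate on sorted s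
--     lo, hi = 0, len(s)
--     while lo < hi:
--         mid = (lo + hi) // 2
--         if ok(s[mid]):
--             lo = mid + 1
--         else:
--             hi = mid
--     return lo
--
--
-- def calc_percentile(value, pool, higher_is_better):
--     if value is None:
--         return None
--     n = len(pool)
--     if n < 5:
--         return None
--     s = sorted(pool)
--     if higher_is_better:
--         worse = _lower(s, lambda x: x < value)
--     else:
--         worse = n - _lower(s, lambda x: x <= value)
--     pct = round((worse / n) * 100)
--     return max(1, min(99, pct))
-- ===== Notes on version B (the rewrite author's own statement) =====
-- stated objective: alternative
-- what changed: B sorts a copy of the pool once and finds the count of worse elements by hand-written binary search (bisect_left for higher_is_better, n - bisect_right otherwise) instead of A's linear generator scan; guards, rounding and clamping are unchanged.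
import Mathlib
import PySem

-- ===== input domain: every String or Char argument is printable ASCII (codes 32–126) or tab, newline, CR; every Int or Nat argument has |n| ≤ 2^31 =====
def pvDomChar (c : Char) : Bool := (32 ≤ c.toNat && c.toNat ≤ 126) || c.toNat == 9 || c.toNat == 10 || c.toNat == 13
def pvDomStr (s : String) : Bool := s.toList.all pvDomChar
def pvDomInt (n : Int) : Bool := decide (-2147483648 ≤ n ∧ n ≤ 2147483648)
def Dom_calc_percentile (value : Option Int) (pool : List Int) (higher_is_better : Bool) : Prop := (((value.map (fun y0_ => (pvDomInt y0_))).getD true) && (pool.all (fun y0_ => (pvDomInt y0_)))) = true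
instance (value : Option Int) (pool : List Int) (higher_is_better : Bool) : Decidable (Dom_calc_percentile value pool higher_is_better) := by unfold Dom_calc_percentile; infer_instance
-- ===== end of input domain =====

-- B replaces A's linear scan by sort-once + hand-written binary search; same guards, rounding, clamp.

-- Shared helper modelling Python's  round((worse / n) * 100)  on 0 ≤ worse ≤ n exactly:
-- both Python versions evaluate this identical expression, so both ports share this model.
-- round-half-even of a/b for b > 0 (Python round() on an exact binary value)
def pvRHE (a b : Int) : Int :=
  let q := a.ediv b
  let r := a - q * b
  if 2 * r < b then q else if b < 2 * r then q + 1 else if q % 2 = 0 then q else q + 1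

-- 2^e ≤ a/b ?  (a, b > 0; e may be negative)
def pvPow2Le (e a b : Int) : Bool :=
  if 0 ≤ e then b * 2 ^ e.toNat ≤ a else b ≤ a * 2 ^ (-e).toNat

-- floor(log2(a/b)) for a, b > 0
def pvFlog2 (a b : Int) : Int :=
  let e0 : Int := (a.natAbs.log2 : Int) - (b.natAbs.log2 : Int)
  let e1 : Int := if pvPow2Le (e0 + 1) a b then e0 + 1 else e0
  if pvPow2Le e1 a b then e1 else e1 - 1

-- nearest IEEE double to a/b (0 < a/b ≤ 2^52 here, no subnormals/overflow), as m / 2^p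
def pvToDbl (a b : Int) : Int × Nat :=
  if a ≤ 0 then (0, 0)
  else
    let p : Nat := (52 - pvFlog2 a b).toNat
    (pvRHE (a * 2 ^ p) b, p)

-- Python's round((worse / n) * 100): two float roundings, then round-half-even to int
def pvRound100 (worse n : Int) : Int :=
  if worse ≤ 0 then 0
  else
    let d1 := pvToDbl worse n
    let d2 := pvToDbl (d1.1 * 100) (2 ^ d1.2)
    pvRHE d2.1 (2 ^ d2.2)

-- ===== PORT A =====
def calc_percentile (value : Option Int) (pool : List Int) (higher_is_better : Bool) : Option Int :=
  match value with
  | none => none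
  | some v =>
    let n : Int := pool.length
    if n < 5 then none
    else
      let worse : Int :=
        if higher_is_better then
          pool.foldl (fun acc x => if x < v then acc + 1 else acc) 0
        else
          pool.foldl (fun acc x => if x > v then acc + 1 else acc) 0
      let pct := pvRound100 worse n
      some (max 1 (min 99 pct))

-- ===== PORT B =====
-- Source B's _lower: binary-search loop; s[mid] is always in range (lo < hi ≤ len s), so getD is exact
def pvLower (s : List Int) (ok : Int → Bool) (lo hi : Nat) : Nat :=
  if lo < hi then
    let mid := (lo + hi) / 2
    if ok (s.getD mid 0) then pvLower s ok (mid + 1) hi else pvLower s ok lo mid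
  else lo
termination_by hi - lo
decreasing_by all_goals omega

def calc_percentile_alt (value : Option Int) (pool : List Int) (higher_is_better : Bool) : Option Int :=
  match value with
  | none => none
  | some v =>
    let n : Int := pool.length
    if n < 5 then none
    else
      let s := PySem.List.sorted pool (fun x => x) false
      let worse : Int :=
        if higher_is_better then
          (pvLower s (fun x => x < v) 0 s.length : Int)
        else
          n - (pvLower s (fun x => x ≤ v) 0 s.length : Int)
      let pct := pvRound100 worse n
      some (max 1 (min 99 pct))

-- ===== PRECONDITION & SPEC =====
def Spec_calc_percentile (value : Option Int) (pool : List Int) (higher_is_better : Bool) (out : Option Int) : Prop := out = calc_percentile_alt value pool higher_is_better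
instance (value : Option Int) (pool : List Int) (higher_is_better : Bool) (out : Option Int) : Decidable (Spec_calc_percentile value pool higher_is_better out) := by unfold Spec_calc_percentile; infer_instance

-- ===== CLAIM (what is proved, stated in full; the proofs are below) =====
def Claim_equal_calc_percentile : Prop := ∀ (value : Option Int) (pool : List Int) (higher_is_better : Bool), Dom_calc_percentile value pool higher_is_better → Spec_calc_percentile value pool higher_is_better (calc_percentile value pool higher_is_better)

-- ===== LEMMAS AND PROOFS =====

-- countP of a list whose elements satisfy p exactly below index j is j
theorem countP_eq_of_boundary (p : Int → Bool) (s : List Int) (j : Nat) (hj : j ≤ s.length)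
    (h : ∀ i (hi : i < s.length), p s[i] = true ↔ i < j) : s.countP p = j := by
  induction s generalizing j with
  | nil => simpa using (Nat.le_zero.mp (by simpa using hj)).symm
  | cons a t ih =>
    cases j with
    | zero =>
      have ha : p a = false := by
        have := h 0 (by simp)
        simp at this
        simpa using this
      have ht : ∀ x ∈ t, ¬ p x = true := by
        intro x hx
        obtain ⟨i, hi, rfl⟩ := List.mem_iff_getElem.mp hx
        have := h (i + 1) (by simpa using Nat.succ_lt_succ hi)
        simp at this
        simp [this]
      simp [ha, List.countP_eq_zero.mpr ht]
    | succ k =>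
      have ha : p a = true := (h 0 (by simp)).mpr (Nat.succ_pos k)
      have ht : t.countP p = k := by
        apply ih k (by simpa using Nat.succ_le_succ_iff.mp hj)
        intro i hi
        have := h (i + 1) (by simpa using Nat.succ_lt_succ hi)
        simpa [Nat.succ_lt_succ_iff] using this
      simp [ha, ht]

-- the binary-search invariant: result counts p on a sorted list with prefix-closed p
theorem pvLower_aux (s : List Int) (p : Int → Bool)
    (hs : ∀ i j (hi : i < s.length) (hj : j < s.length), i ≤ j → s[i] ≤ s[j])
    (hmono : ∀ x y : Int, x ≤ y → p y = true → p x = true) :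
    ∀ lo hi, lo ≤ hi → hi ≤ s.length →
      (∀ i (h : i < s.length), i < lo → p s[i] = true) →
      (∀ i (h : i < s.length), hi ≤ i → p s[i] = false) →
      pvLower s p lo hi = s.countP p := by
  intro lo hi
  induction' hd : hi - lo using Nat.strong_induction_on with d ih generalizing lo hi
  intro hlh hhl hpre hpost
  rw [pvLower]
  by_cases hlt : lo < hi
  · simp only [hlt, if_true]
    have hmid0 : lo ≤ (lo + hi) / 2 := by omega
    have hmid1 : (lo + hi) / 2 < hi := by omega
    have hmidlen : (lo + hi) / 2 < s.length := lt_of_lt_of_le hmid1 hhl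
    have hget : s.getD ((lo + hi) / 2) 0 = s[(lo + hi) / 2] := List.getD_eq_getElem s 0 hmidlen
    by_cases hp : p (s.getD ((lo + hi) / 2) 0) = true
    · rw [if_pos hp]
      apply ih (hi - ((lo + hi) / 2 + 1)) (by omega) ((lo + hi) / 2 + 1) hi rfl (by omega) hhl _ hpost
      intro i hilen hilt
      have hile : i ≤ (lo + hi) / 2 := by omega
      exact hmono _ _ (hs i _ hilen hmidlen hile) (by rwa [hget] at hp)
    · rw [if_neg hp]
      apply ih ((lo + hi) / 2 - lo) (by omega) lo ((lo + hi) / 2) rfl hmid0 (le_trans (le_of_lt hmid1) hhl) hpre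
      intro i hilen hile
      rw [hget] at hp
      by_contra hc
      have hpi : p s[i] = true := by
        cases h : p s[i] with
        | false => exact absurd h hc
        | true => rfl
      exact hp (hmono _ _ (hs _ i hmidlen hilen hile) hpi)
  · simp only [hlt, if_false]
    have hle : lo = hi := by omega
    subst hle
    exact (countP_eq_of_boundary p s lo hhl (fun i hi => by
      constructor
      · intro h; by_contra hc
        have := hpost i hi (by omega)
        simp [this] at h
      · intro h; exact hpre i hi h)).symm

theorem pvLower_eq_countP (s : List Int) (p : Int → Bool)
    (hs : s.Pairwise (· ≤ ·))
    (hmono : ∀ x y : Int, x ≤ y → p y = true → p x = true) :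
    pvLower s p 0 s.length = s.countP p := by
  apply pvLower_aux s p _ hmono 0 s.length (Nat.zero_le _) le_rfl
  · intro i _ h; omega
  · intro i h hle; omega
  · intro i j hi hj hij
    rcases Nat.lt_or_ge i j with h | h
    · exact List.pairwise_iff_getElem.mp hs i j hi hj h
    · have : i = j := by omega
      subst this; exact le_rfl

theorem calc_percentile_spec : Claim_equal_calc_percentile := by
  intro value pool higher_is_better _
  unfold Spec_calc_percentile calc_percentile calc_percentile_alt
  cases value with
  | none => rfl
  | some v =>
    simp only
    by_cases hn : (pool.length : Int) < 5
    · simp [hn]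
    · simp only [hn, if_false]
      have hpair : (PySem.List.sorted pool (fun x => x) false).Pairwise (· ≤ ·) := by
        simpa using PySem.List.sorted_pairwise (xs := pool) (key := fun x => x)
      have hperm : (PySem.List.sorted pool (fun x => x) false).Perm pool :=
        PySem.List.sorted_perm pool (fun x => x) false
      have hlen : (PySem.List.sorted pool (fun x => x) false).length = pool.length :=
        hperm.length_eq
      cases higher_is_better with
      | true =>
        have h1 : pvLower (PySem.List.sorted pool (fun x => x) false) (fun x => decide (x < v)) 0
            (PySem.List.sorted pool (fun x => x) false).length
            = (PySem.List.sorted pool (fun x => x) false).countP (fun x => decide (x < v)) := by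
          apply pvLower_eq_countP _ _ hpair
          intro x y hxy hy
          simp only [decide_eq_true_eq] at *
          omega
        have h2 : (PySem.List.sorted pool (fun x => x) false).countP (fun x => decide (x < v))
            = pool.countP (fun x => decide (x < v)) := hperm.countP_eq _
        have h3 : pool.foldl (fun acc x => if x < v then acc + 1 else acc) (0 : Int)
            = (pool.countP (fun x => decide (x < v)) : Int) := by
          simpa using PySem.List.foldl_ite_add_one (p := fun x => x < v) (l := pool) (a := (0 : Int))
        simp only [if_true]
        rw [h3, h1, h2]
      | false =>
        have h1 : pvLower (PySem.List.sorted pool (fun x => x) false) (fun x => decide (x ≤ v)) 0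
            (PySem.List.sorted pool (fun x => x) false).length
            = (PySem.List.sorted pool (fun x => x) false).countP (fun x => decide (x ≤ v)) := by
          apply pvLower_eq_countP _ _ hpair
          intro x y hxy hy
          simp only [decide_eq_true_eq] at *
          omega
        have h2 : (PySem.List.sorted pool (fun x => x) false).countP (fun x => decide (x ≤ v))
            = pool.countP (fun x => decide (x ≤ v)) := hperm.countP_eq _
        have h3 : pool.foldl (fun acc x => if x > v then acc + 1 else acc) (0 : Int)
            = (pool.countP (fun x => decide (x > v)) : Int) := by
          simpa using PySem.List.foldl_ite_add_one (p := fun x => x > v) (l := pool) (a := (0 : Int))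
        have hfun : (fun a : Int => (decide ¬(decide (a > v) = true))) = (fun x : Int => decide (x ≤ v)) := by
          funext x
          rcases le_or_gt x v with h | h
          · simp [h, not_lt.mpr h]
          · simp [h, not_le.mpr h]
        have hsplit : pool.countP (fun x => decide (x > v)) + pool.countP (fun x => decide (x ≤ v)) = pool.length := by
          have hlen2 := List.length_eq_countP_add_countP (l := pool) (p := fun x => decide (x > v))
          rw [hfun] at hlen2
          omega
        simp only [Bool.false_eq_true, if_false]
        rw [h3]
        have : (pool.length : Int) - (pvLower (PySem.List.sorted pool (fun x => x) false) (fun x => decide (x ≤ v)) 0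
            (PySem.List.sorted pool (fun x => x) false).length : Int)
            = (pool.countP (fun x => decide (x > v)) : Int) := by
          rw [h1, h2]
          omega
        rw [← this]
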